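-- pv_equiv track=rewrite | github.com/asmortongpt/Fleet-AzureDevOps | fix-all-ts2304.py | categorize_missing_imports
-- ===== SOURCE A (Python) =====
-- LUCIDE_ICONS = {
--     'Zap', 'Car', 'AlertTriangle', 'Route', 'MessageCircle', 'AlertCircle',
--     'TrendingUp', 'TrendingDown', 'Minus', 'Store', 'DollarSign', 'Calendar',
--     'Shield', 'Package', 'Truck', 'Users', 'Settings', 'CheckCircle',
--     'XCircle', 'Info', 'Plus', 'Minus', 'Edit', 'Trash', 'Eye', 'Download',
--     'Upload', 'Search', 'Filter', 'Menu', 'X', 'ChevronDown', 'ChevronUp',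
--     'ChevronLeft', 'ChevronRight', 'ArrowUp', 'ArrowDown', 'ArrowLeft', 'ArrowRight'
-- }
--
-- RECHARTS_COMPONENTS = {
--     'Sector', 'Cell', 'LabelList', 'PieChart', 'Pie', 'LineChart', 'Line',
--     'BarChart', 'Bar', 'XAxis', 'YAxis', 'CartesianGrid', 'Tooltip', 'Legend',
--     'ResponsiveContainer', 'Area', 'AreaChart'
-- }
--
-- REACT_IMPORTS = {
--     'useState', 'useEffect', 'useCallback', 'useMemo', 'useRef', 'useContext',
--     'createContext', 'FC', 'ReactNode', 'ReactElement', 'ComponentProps'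
-- }
--
-- def categorize_missing_imports(missing_names):
--     """Categorize missing imports by their source"""
--     categories = {
--         'lucide-react': [],
--         'recharts': [],
--         'react': [],
--         'logger': []
--     }
--
--     for name in missing_names:
--         if name == 'logger':
--             categories['logger'].append(name)
--         elif name in LUCIDE_ICONS:
--             categories['lucide-react'].append(name)
--         elif name in RECHARTS_COMPONENTS:
--             categories['recharts'].append(name)
--         elif name in REACT_IMPORTS:
--             categories['react'].append(name)
--
--     return {k: sorted(set(v)) for k, v in categories.items() if v}
-- ===== SOURCE B (Python) =====
-- LUCIDE_ICONS = {
--     'Zap', 'Car', 'AlertTriangle', 'Route', 'MessageCircle', 'AlertCircle',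
--     'TrendingUp', 'TrendingDown', 'Minus', 'Store', 'DollarSign', 'Calendar',
--     'Shield', 'Package', 'Truck', 'Users', 'Settings', 'CheckCircle',
--     'XCircle', 'Info', 'Plus', 'Minus', 'Edit', 'Trash', 'Eye', 'Download',
--     'Upload', 'Search', 'Filter', 'Menu', 'X', 'ChevronDown', 'ChevronUp',
--     'ChevronLeft', 'ChevronRight', 'ArrowUp', 'ArrowDown', 'ArrowLeft', 'ArrowRight'
-- }
--
-- RECHARTS_COMPONENTS = {
--     'Sector', 'Cell', 'LabelList', 'PieChart', 'Pie', 'LineChart', 'Line',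
--     'BarChart', 'Bar', 'XAxis', 'YAxis', 'CartesianGrid', 'Tooltip', 'Legend',
--     'ResponsiveContainer', 'Area', 'AreaChart'
-- }
--
-- REACT_IMPORTS = {
--     'useState', 'useEffect', 'useCallback', 'useMemo', 'useRef', 'useContext',
--     'createContext', 'FC', 'ReactNode', 'ReactElement', 'ComponentProps'
-- }
--
-- def categorize_missing_imports(missing_names):
--     """Categorize missing imports by their source (independent pass per bucket)."""
--     buckets = [
--         ('lucide-react', sorted({n for n in missing_names if n in LUCIDE_ICONS})),
--         ('recharts', sorted({n for n in missing_names if n in RECHARTS_COMPONENTS})),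
--         ('react', sorted({n for n in missing_names if n in REACT_IMPORTS})),
--         ('logger', sorted({n for n in missing_names if n == 'logger'})),
--     ]
--     return {k: v for k, v in buckets if v}
-- ===== Notes on version B (the rewrite author's own statement) =====
-- stated objective: simpler
-- what changed: Replaces A's single loop that priority-dispatches each name into a shared dict of four accumulator lists (then post-processes with a dict comprehension) by four independent filter-dedup-sort passes, one per bucket, relying on the disjointness of the three import sets and 'logger' being in none of them.
import Mathlib
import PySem

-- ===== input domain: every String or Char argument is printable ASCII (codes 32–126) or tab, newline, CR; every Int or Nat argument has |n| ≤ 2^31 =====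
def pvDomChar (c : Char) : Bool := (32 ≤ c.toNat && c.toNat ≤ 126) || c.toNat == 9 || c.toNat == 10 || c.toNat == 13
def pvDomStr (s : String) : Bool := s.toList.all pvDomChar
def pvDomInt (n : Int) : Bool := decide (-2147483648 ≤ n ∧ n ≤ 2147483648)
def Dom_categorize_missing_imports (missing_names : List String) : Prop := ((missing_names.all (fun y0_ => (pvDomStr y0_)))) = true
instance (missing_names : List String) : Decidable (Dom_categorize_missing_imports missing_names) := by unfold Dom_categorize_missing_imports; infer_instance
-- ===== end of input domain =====

-- B replaces A's single priority-dispatched loop over a shared dict of accumulators by four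
-- independent filter-dedup-sort passes, one per bucket (objective: simpler decomposition).

-- ===== PORT A =====
def LUCIDE_ICONS : PySem.Set String := PySem.Set.ofList
  ["Zap", "Car", "AlertTriangle", "Route", "MessageCircle", "AlertCircle",
   "TrendingUp", "TrendingDown", "Minus", "Store", "DollarSign", "Calendar",
   "Shield", "Package", "Truck", "Users", "Settings", "CheckCircle",
   "XCircle", "Info", "Plus", "Minus", "Edit", "Trash", "Eye", "Download",
   "Upload", "Search", "Filter", "Menu", "X", "ChevronDown", "ChevronUp",
   "ChevronLeft", "ChevronRight", "ArrowUp", "ArrowDown", "ArrowLeft", "ArrowRight"]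

def RECHARTS_COMPONENTS : PySem.Set String := PySem.Set.ofList
  ["Sector", "Cell", "LabelList", "PieChart", "Pie", "LineChart", "Line",
   "BarChart", "Bar", "XAxis", "YAxis", "CartesianGrid", "Tooltip", "Legend",
   "ResponsiveContainer", "Area", "AreaChart"]

def REACT_IMPORTS : PySem.Set String := PySem.Set.ofList
  ["useState", "useEffect", "useCallback", "useMemo", "useRef", "useContext",
   "createContext", "FC", "ReactNode", "ReactElement", "ComponentProps"]

-- the loop body of A: categories as the 4-tuple (lucide-react, recharts, react, logger)
def catStep (acc : List String × List String × List String × List String) (name : String) :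
    List String × List String × List String × List String :=
  if name == "logger" then (acc.1, acc.2.1, acc.2.2.1, acc.2.2.2 ++ [name])
  else if PySem.Set.contains LUCIDE_ICONS name then (acc.1 ++ [name], acc.2.1, acc.2.2.1, acc.2.2.2)
  else if PySem.Set.contains RECHARTS_COMPONENTS name then (acc.1, acc.2.1 ++ [name], acc.2.2.1, acc.2.2.2)
  else if PySem.Set.contains REACT_IMPORTS name then (acc.1, acc.2.1, acc.2.2.1 ++ [name], acc.2.2.2)
  else acc

def categorize_missing_imports (missing_names : List String) : List (String × List String) :=
  let cats := missing_names.foldl catStep ([], [], [], [])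
  -- {k: sorted(set(v)) for k, v in categories.items() if v}, in dict insertion order
  (if cats.1.isEmpty then [] else [("lucide-react", PySem.List.sorted (PySem.Set.ofList cats.1) (fun x => x) false)]) ++
  (if cats.2.1.isEmpty then [] else [("recharts", PySem.List.sorted (PySem.Set.ofList cats.2.1) (fun x => x) false)]) ++
  (if cats.2.2.1.isEmpty then [] else [("react", PySem.List.sorted (PySem.Set.ofList cats.2.2.1) (fun x => x) false)]) ++
  (if cats.2.2.2.isEmpty then [] else [("logger", PySem.List.sorted (PySem.Set.ofList cats.2.2.2) (fun x => x) false)])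

-- ===== PORT B =====
-- sorted({n for n in xs if p(n)})
def bucketB (p : String → Bool) (xs : List String) : List String :=
  PySem.List.sorted (PySem.Set.ofList (xs.filter p)) (fun x => x) false

def categorize_missing_imports_alt (missing_names : List String) : List (String × List String) :=
  let buckets : List (String × List String) :=
    [("lucide-react", bucketB (fun n => PySem.Set.contains LUCIDE_ICONS n) missing_names),
     ("recharts", bucketB (fun n => PySem.Set.contains RECHARTS_COMPONENTS n) missing_names),
     ("react", bucketB (fun n => PySem.Set.contains REACT_IMPORTS n) missing_names),
     ("logger", bucketB (fun n => n == "logger") missing_names)]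
  buckets.filter (fun kv => !kv.2.isEmpty)

-- ===== PRECONDITION & SPEC =====
def Spec_categorize_missing_imports (missing_names : List String) (out : List (String × List String)) : Prop := out = categorize_missing_imports_alt missing_names
instance (missing_names : List String) (out : List (String × List String)) : Decidable (Spec_categorize_missing_imports missing_names out) := by unfold Spec_categorize_missing_imports; infer_instance

-- ===== CLAIM (what is proved, stated in full; the proofs are below) =====
def Claim_equal_categorize_missing_imports : Prop := ∀ (missing_names : List String), Dom_categorize_missing_imports missing_names → Spec_categorize_missing_imports missing_names (categorize_missing_imports missing_names)

-- ===== LEMMAS AND PROOFS =====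

-- A's effective selection predicate of each bucket, read off the branch order
def pLuc (n : String) : Bool := !(n == "logger") && PySem.Set.contains LUCIDE_ICONS n
def pRch (n : String) : Bool := !(n == "logger") && !PySem.Set.contains LUCIDE_ICONS n && PySem.Set.contains RECHARTS_COMPONENTS n
def pRct (n : String) : Bool := !(n == "logger") && !PySem.Set.contains LUCIDE_ICONS n && !PySem.Set.contains RECHARTS_COMPONENTS n && PySem.Set.contains REACT_IMPORTS n
def pLog (n : String) : Bool := n == "logger"

lemma foldA (xs : List String) : ∀ a b c d,
    xs.foldl catStep (a, b, c, d) =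
      (a ++ xs.filter pLuc, b ++ xs.filter pRch, c ++ xs.filter pRct, d ++ xs.filter pLog) := by
  induction xs with
  | nil => simp
  | cons n t ih =>
    intro a b c d
    by_cases h1 : n = "logger" <;> by_cases h2 : n ∈ LUCIDE_ICONS <;>
      by_cases h3 : n ∈ RECHARTS_COMPONENTS <;> by_cases h4 : n ∈ REACT_IMPORTS <;>
      simp [List.foldl_cons, catStep, h1, h2, h3, h4, ih, pLuc, pRch, pRct, pLog]

set_option maxRecDepth 10000 in
lemma luc_ne_logger (n : String) (h : PySem.Set.contains LUCIDE_ICONS n = true) :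
    (n == "logger") = false := by
  have hm : n ∈ LUCIDE_ICONS := (PySem.Set.contains_iff _ _).mp h
  have hm' : n ∈ (["Zap", "Car", "AlertTriangle", "Route", "MessageCircle", "AlertCircle",
   "TrendingUp", "TrendingDown", "Minus", "Store", "DollarSign", "Calendar",
   "Shield", "Package", "Truck", "Users", "Settings", "CheckCircle",
   "XCircle", "Info", "Plus", "Minus", "Edit", "Trash", "Eye", "Download",
   "Upload", "Search", "Filter", "Menu", "X", "ChevronDown", "ChevronUp",
   "ChevronLeft", "ChevronRight", "ArrowUp", "ArrowDown", "ArrowLeft", "ArrowRight"] : List String) :=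
    (PySem.Set.mem_ofList _ _).mp hm
  fin_cases hm' <;> decide

set_option maxRecDepth 10000 in
lemma rch_ne (n : String) (h : PySem.Set.contains RECHARTS_COMPONENTS n = true) :
    (n == "logger") = false ∧ PySem.Set.contains LUCIDE_ICONS n = false := by
  have hm : n ∈ RECHARTS_COMPONENTS := (PySem.Set.contains_iff _ _).mp h
  have hm' : n ∈ (["Sector", "Cell", "LabelList", "PieChart", "Pie", "LineChart", "Line",
   "BarChart", "Bar", "XAxis", "YAxis", "CartesianGrid", "Tooltip", "Legend",
   "ResponsiveContainer", "Area", "AreaChart"] : List String) := (PySem.Set.mem_ofList _ _).mp hm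
  fin_cases hm' <;> exact ⟨by decide, by decide⟩

set_option maxRecDepth 10000 in
lemma rct_ne (n : String) (h : PySem.Set.contains REACT_IMPORTS n = true) :
    (n == "logger") = false ∧ PySem.Set.contains LUCIDE_ICONS n = false ∧
      PySem.Set.contains RECHARTS_COMPONENTS n = false := by
  have hm : n ∈ REACT_IMPORTS := (PySem.Set.contains_iff _ _).mp h
  have hm' : n ∈ (["useState", "useEffect", "useCallback", "useMemo", "useRef", "useContext",
   "createContext", "FC", "ReactNode", "ReactElement", "ComponentProps"] : List String) :=
    (PySem.Set.mem_ofList _ _).mp hm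
  fin_cases hm' <;> exact ⟨by decide, by decide, by decide⟩

lemma pLuc_eq : pLuc = fun n => PySem.Set.contains LUCIDE_ICONS n := by
  funext n
  by_cases h : n ∈ LUCIDE_ICONS
  · have hb : PySem.Set.contains LUCIDE_ICONS n = true := (PySem.Set.contains_iff _ _).mpr h
    have hl : n ≠ "logger" := by simpa using luc_ne_logger n hb
    simp [pLuc, h, hl]
  · simp [pLuc, h]

lemma pRch_eq : pRch = fun n => PySem.Set.contains RECHARTS_COMPONENTS n := by
  funext n
  by_cases h : n ∈ RECHARTS_COMPONENTS
  · have hb : PySem.Set.contains RECHARTS_COMPONENTS n = true := (PySem.Set.contains_iff _ _).mpr h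
    have hl : n ≠ "logger" := by simpa using (rch_ne n hb).1
    have h2 : n ∉ LUCIDE_ICONS := by
      intro hm
      have hc := (PySem.Set.contains_iff _ _).mpr hm
      rw [(rch_ne n hb).2] at hc
      exact Bool.false_ne_true hc
    simp [pRch, h, hl, h2]
  · simp [pRch, h]

lemma pRct_eq : pRct = fun n => PySem.Set.contains REACT_IMPORTS n := by
  funext n
  by_cases h : n ∈ REACT_IMPORTS
  · have hb : PySem.Set.contains REACT_IMPORTS n = true := (PySem.Set.contains_iff _ _).mpr h
    have hl : n ≠ "logger" := by simpa using (rct_ne n hb).1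
    have h2 : n ∉ LUCIDE_ICONS := by
      intro hm
      have hc := (PySem.Set.contains_iff _ _).mpr hm
      rw [(rct_ne n hb).2.1] at hc
      exact Bool.false_ne_true hc
    have h3 : n ∉ RECHARTS_COMPONENTS := by
      intro hm
      have hc := (PySem.Set.contains_iff _ _).mpr hm
      rw [(rct_ne n hb).2.2] at hc
      exact Bool.false_ne_true hc
    simp [pRct, h, hl, h2, h3]
  · simp [pRct, h]

lemma sorted_set_nil (l : List String) :
    PySem.List.sorted (PySem.Set.ofList l) (fun x => x) false = [] ↔ l = [] := by
  rw [PySem.List.sorted_eq_nil_iff]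
  constructor
  · intro h
    cases l with
    | nil => rfl
    | cons y t =>
      exfalso
      have : y ∈ PySem.Set.ofList (y :: t) := (PySem.Set.mem_ofList _ _).mpr (by simp)
      simp [h] at this
  · intro h; simp [h, PySem.Set.ofList]

-- ===== VERDICT (by name: the statement is the Claim_ definition above) =====
theorem categorize_missing_imports_spec : Claim_equal_categorize_missing_imports := by
  intro xs _
  unfold Spec_categorize_missing_imports categorize_missing_imports categorize_missing_imports_alt
  simp only [foldA, List.nil_append]
  rw [show (xs.filter pLuc) = xs.filter (fun n => PySem.Set.contains LUCIDE_ICONS n) from by rw [pLuc_eq],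
      show (xs.filter pRch) = xs.filter (fun n => PySem.Set.contains RECHARTS_COMPONENTS n) from by rw [pRch_eq],
      show (xs.filter pRct) = xs.filter (fun n => PySem.Set.contains REACT_IMPORTS n) from by rw [pRct_eq]]
  simp only [bucketB, List.filter_cons, List.filter_nil]
  simp only [List.isEmpty_iff, Bool.not_eq_eq_eq_not, Bool.not_true, List.isEmpty_eq_false_iff,
    sorted_set_nil, ne_eq]
  unfold pLog
  split_ifs <;> rfl
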